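-- pv_equiv track=rewrite | github.com/h1tlex/Board-Game | Board game/aruba.py | est_dans_grille
-- ===== SOURCE A (Python) =====
-- def est_dans_grille(colonne,ligne):
--     colonne_valide=False
--     ligne_valide=False
--     #recherche de ligne et colonne choisi
--     if len(colonne+ligne)>2:
--         return False
--     for i in LetterList: #parcourir les colonnes
--         if i==colonne:
--             colonne_valide=True
--
--     for i in NumList:
--         if i==ligne: #parcourir les lignes
--             ligne_valide=True
--
--     if colonne_valide==False or ligne_valide==False:  #si la saisi de colonne ou ligne n'appatient pas au grille
--         return False
--     return True
--
-- NumList=['1','2','3','4','5','6','7'] #Listes de ligne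
--
-- LetterList=["A","B","C","D","E","F","G"] #Liste de colonne
-- ===== SOURCE B (Python) =====
-- def est_dans_grille(colonne, ligne):
--     if len(colonne + ligne) > 2:
--         return False
--     return 'A' <= colonne <= 'G' and '1' <= ligne <= '7'
-- ===== Notes on version B (the rewrite author's own statement) =====
-- stated objective: simpler
-- what changed: Replaces A's flag-maintaining membership scans over the LetterList/NumList lists with a single closed-form lexicographic range check ('A' <= colonne <= 'G' and '1' <= ligne <= '7') after the same length guard.
import Mathlib
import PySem

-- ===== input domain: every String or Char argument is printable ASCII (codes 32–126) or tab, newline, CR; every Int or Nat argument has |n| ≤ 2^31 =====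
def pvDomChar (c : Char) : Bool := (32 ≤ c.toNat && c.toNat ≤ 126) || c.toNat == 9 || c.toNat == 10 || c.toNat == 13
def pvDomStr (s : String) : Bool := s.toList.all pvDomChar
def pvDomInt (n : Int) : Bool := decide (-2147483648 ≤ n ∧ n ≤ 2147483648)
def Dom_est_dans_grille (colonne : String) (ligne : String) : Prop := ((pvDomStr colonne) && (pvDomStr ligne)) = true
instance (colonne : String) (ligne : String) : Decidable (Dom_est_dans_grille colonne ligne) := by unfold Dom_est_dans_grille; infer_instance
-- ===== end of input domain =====

-- B replaces A's two membership scans over the letter/digit lists with one closed-form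
-- lexicographic range check ('A' <= colonne <= 'G' and '1' <= ligne <= '7'), keeping A's
-- length guard; objective: simpler.

-- ===== PORT A =====
def LetterList : List String := ["A", "B", "C", "D", "E", "F", "G"]
def NumList : List String := ["1", "2", "3", "4", "5", "6", "7"]

def est_dans_grille (colonne : String) (ligne : String) : Bool :=
  let colonne_valide := false
  let ligne_valide := false
  if PySem.Chars.len (colonne.toList ++ ligne.toList) > 2 then false
  else
    let colonne_valide := LetterList.foldl (fun cv i => if i == colonne then true else cv) colonne_valide
    let ligne_valide := NumList.foldl (fun lv i => if i == ligne then true else lv) ligne_valide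
    if colonne_valide == false || ligne_valide == false then false else true

-- ===== PORT B =====
-- Python's string comparison is code-point lexicographic = Lean's ≤ on .toList (exact per PySem).
def est_dans_grille_alt (colonne : String) (ligne : String) : Bool :=
  if PySem.Chars.len (colonne.toList ++ ligne.toList) > 2 then false
  else (decide ("A".toList ≤ colonne.toList) && decide (colonne.toList ≤ "G".toList))
       && (decide ("1".toList ≤ ligne.toList) && decide (ligne.toList ≤ "7".toList))

-- ===== PRECONDITION & SPEC =====
def Spec_est_dans_grille (colonne : String) (ligne : String) (out : Bool) : Prop := out = est_dans_grille_alt colonne ligne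
instance (colonne : String) (ligne : String) (out : Bool) : Decidable (Spec_est_dans_grille colonne ligne out) := by unfold Spec_est_dans_grille; infer_instance

-- ===== CLAIM (what is proved, stated in full; the proofs are below) =====
def Claim_equal_est_dans_grille : Prop := ∀ (colonne : String) (ligne : String), Dom_est_dans_grille colonne ligne → Spec_est_dans_grille colonne ligne (est_dans_grille colonne ligne)

-- ===== LEMMAS AND PROOFS =====

-- cons-vs-cons characterisation of the lexicographic ≤ on List Char
theorem lex_cons_le (a b : Char) (s t : List Char) :
    ((a :: s : List Char) ≤ b :: t) ↔ (a < b ∨ (a = b ∧ s ≤ t)) := by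
  rw [le_iff_lt_or_eq, le_iff_lt_or_eq]
  have hlt : ∀ (u v : List Char), (u < v) ↔ List.Lex (· < ·) u v := fun u v => Iff.rfl
  rw [hlt, hlt]
  constructor
  · rintro (h | h)
    · cases h with
      | rel h => exact Or.inl h
      | cons h => exact Or.inr ⟨rfl, Or.inl h⟩
    · cases h; exact Or.inr ⟨rfl, Or.inr rfl⟩
  · rintro (h | ⟨rfl, (h | rfl)⟩)
    · exact Or.inl (List.Lex.rel h)
    · exact Or.inl (List.Lex.cons h)
    · exact Or.inr rfl

theorem lex_not_cons_le_nil (a : Char) (t : List Char) : ¬ ((a :: t : List Char) ≤ []) := by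
  rw [le_iff_lt_or_eq]
  rintro (h | h)
  · cases h
  · cases h

theorem lex_nil_le (t : List Char) : (([] : List Char) ≤ t) := by
  cases t with
  | nil => exact le_refl _
  | cons b u => exact le_of_lt List.Lex.nil

theorem beq_toList (s t : String) : (s == t) = (s.toList == t.toList) := by
  simp [String.ext_iff]

-- single character in A..G: membership in the seven letters = the two ordered comparisons
theorem letter_range (a : Char) :
    ((decide ('G' = a) || (decide ('F' = a) || (decide ('E' = a) || (decide ('D' = a) ||
      (decide ('C' = a) || (decide ('B' = a) || decide ('A' = a)))))))) =
    ((decide ('A' < a) || decide ('A' = a)) && (decide (a < 'G') || decide (a = 'G'))) := by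
  apply Bool.eq_iff_iff.mpr
  simp only [Bool.or_eq_true, Bool.and_eq_true, decide_eq_true_eq, Char.lt_def, Char.ext_iff,
    UInt32.lt_iff_toNat_lt, ← UInt32.toNat_inj]
  have eA : ('A' : Char).val.toNat = 65 := rfl
  have eB : ('B' : Char).val.toNat = 66 := rfl
  have eC : ('C' : Char).val.toNat = 67 := rfl
  have eD : ('D' : Char).val.toNat = 68 := rfl
  have eE : ('E' : Char).val.toNat = 69 := rfl
  have eF : ('F' : Char).val.toNat = 70 := rfl
  have eG : ('G' : Char).val.toNat = 71 := rfl
  rw [eA, eB, eC, eD, eE, eF, eG]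
  omega

-- single character in 1..7: same fact for the seven digits
theorem digit_range (b : Char) :
    ((decide ('7' = b) || (decide ('6' = b) || (decide ('5' = b) || (decide ('4' = b) ||
      (decide ('3' = b) || (decide ('2' = b) || decide ('1' = b)))))))) =
    ((decide ('1' < b) || decide ('1' = b)) && (decide (b < '7') || decide (b = '7'))) := by
  apply Bool.eq_iff_iff.mpr
  simp only [Bool.or_eq_true, Bool.and_eq_true, decide_eq_true_eq, Char.lt_def, Char.ext_iff,
    UInt32.lt_iff_toNat_lt, ← UInt32.toNat_inj]
  have e1 : ('1' : Char).val.toNat = 49 := rfl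
  have e2 : ('2' : Char).val.toNat = 50 := rfl
  have e3 : ('3' : Char).val.toNat = 51 := rfl
  have e4 : ('4' : Char).val.toNat = 52 := rfl
  have e5 : ('5' : Char).val.toNat = 53 := rfl
  have e6 : ('6' : Char).val.toNat = 54 := rfl
  have e7 : ('7' : Char).val.toNat = 55 := rfl
  rw [e1, e2, e3, e4, e5, e6, e7]
  omega

theorem est_dans_grille_eq_alt (c l : String) : est_dans_grille c l = est_dans_grille_alt c l := by
  unfold est_dans_grille est_dans_grille_alt
  simp only [LetterList, NumList, List.foldl, beq_toList]
  have hA : "A".toList = ['A'] := rfl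
  have hB : "B".toList = ['B'] := rfl
  have hC : "C".toList = ['C'] := rfl
  have hD : "D".toList = ['D'] := rfl
  have hE : "E".toList = ['E'] := rfl
  have hF : "F".toList = ['F'] := rfl
  have hG : "G".toList = ['G'] := rfl
  have h1 : "1".toList = ['1'] := rfl
  have h2 : "2".toList = ['2'] := rfl
  have h3 : "3".toList = ['3'] := rfl
  have h4 : "4".toList = ['4'] := rfl
  have h5 : "5".toList = ['5'] := rfl
  have h6 : "6".toList = ['6'] := rfl
  have h7 : "7".toList = ['7'] := rfl
  rw [hA, hB, hC, hD, hE, hF, hG, h1, h2, h3, h4, h5, h6, h7]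
  rcases hcs : c.toList with _ | ⟨a, _ | ⟨a2, ct⟩⟩ <;>
    rcases hls : l.toList with _ | ⟨b, _ | ⟨b2, lt2⟩⟩ <;>
    simp [PySem.Chars.len, lex_cons_le, lex_not_cons_le_nil, lex_nil_le]
  · -- one character each: the two range facts
    rw [letter_range a, digit_range b]
  · -- two-or-more characters on each side: the length guard fires
    intro h; omega

-- ===== VERDICT (by name: the statement is the Claim_ definition above) =====
theorem est_dans_grille_spec : Claim_equal_est_dans_grille := by
  intro colonne ligne _
  unfold Spec_est_dans_grille
  exact est_dans_grille_eq_alt colonne ligne
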